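-- pv_equiv track=rewrite | github.com/adamshtrasner/Python-Projects | Nonogram/nonogram.py | get_intersection_row
-- ===== SOURCE A (Python) =====
-- def get_intersection_row(rows):
--     """
--     :param rows: the rows of the nonogram board
--     :return: a row that is the intersection of all rows
--     """
--     inter_row = []
--     for i in range(len(rows[0])):
--         flag = True
--         for j in range(len(rows) - 1):
--             if rows[j][i] != rows[j+1][i]:
--                 # if the square in the 'j' position is not the same in each row,
--                 # then the 'j' position in the intersection row is unknown.
--                 flag = False
--                 break
--         if flag:
--             inter_row.append(rows[0][i])
--         else:
--             inter_row.append(-1)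
--     return inter_row
-- ===== SOURCE B (Python) =====
-- def get_intersection_row(rows):
--     acc = list(rows[0])
--     for row in rows[1:]:
--         acc = [x if x == y else -1 for x, y in zip(acc, row)]
--     return acc
-- ===== Notes on version B (the rewrite author's own statement) =====
-- stated objective: alternative
-- what changed: Replaces A's column-indexed double loop (outer over columns, inner adjacent-row comparison with break) by a row-wise fold: start from a copy of the first row and repeatedly merge the accumulator with each further row via zip, a mismatch turning the cell into the absorbing value -1; no per-column indexing remains.
-- outside the precondition, e.g. on get_intersection_row([[1, 2], [9, 9], [3]]): A returns [-1, -1], B returns [-1]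
import Mathlib
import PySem

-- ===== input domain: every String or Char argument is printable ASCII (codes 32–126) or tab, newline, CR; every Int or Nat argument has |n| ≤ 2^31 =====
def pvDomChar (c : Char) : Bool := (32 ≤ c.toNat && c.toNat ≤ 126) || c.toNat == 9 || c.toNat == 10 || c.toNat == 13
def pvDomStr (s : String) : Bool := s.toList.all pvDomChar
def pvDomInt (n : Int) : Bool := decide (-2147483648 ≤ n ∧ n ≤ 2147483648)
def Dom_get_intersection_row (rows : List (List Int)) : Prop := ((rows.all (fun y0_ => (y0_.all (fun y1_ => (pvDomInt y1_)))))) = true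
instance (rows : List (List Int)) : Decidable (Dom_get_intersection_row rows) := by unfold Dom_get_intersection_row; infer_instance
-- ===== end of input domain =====

-- B replaces A's column-indexed double loop by a row-wise fold: start from the first row and
-- merge each further row into the accumulator (mismatch → absorbing -1); proved equal on
-- nonempty boards whose first row is no longer than any other row.

-- ===== PORT A =====
-- inner loop 'for j in range(len(rows)-1): if rows[j][i] != rows[j+1][i]: flag=False; break'
-- transcribed as structural recursion over adjacent row pairs; indexing uses pyGetD with
-- default 0, exact under Pre_ (every access is in range there; out of range Python raises).
def pvAllEq (i : Int) : List (List Int) → Bool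
  | r1 :: r2 :: rest =>
      if PySem.List.pyGetD r1 i 0 = PySem.List.pyGetD r2 i 0 then pvAllEq i (r2 :: rest)
      else false
  | _ => true

def get_intersection_row (rows : List (List Int)) : List Int :=
  (PySem.List.pyRange 0 ((rows.headD []).length : Int) 1).foldl
    (fun inter_row i =>
      if pvAllEq i rows then inter_row ++ [PySem.List.pyGetD (rows.headD []) i (-1)]
      else inter_row ++ [-1]) []

-- ===== PORT B =====
-- '[x if x == y else -1 for x, y in zip(acc, row)]'
def pvMerge (acc row : List Int) : List Int :=
  (acc.zip row).map (fun p => if p.1 = p.2 then p.1 else -1)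

-- 'acc = rows[0]; for row in rows[1:]: acc = merge(acc, row)'
def get_intersection_row_alt (rows : List (List Int)) : List Int :=
  rows.tail.foldl pvMerge (rows.headD [])

-- ===== PRECONDITION & SPEC =====
-- Pre_ restricts to the natural domain of the function — a nonempty board whose first row is
-- no longer than any other row (in particular any rectangular board): on the empty list A
-- raises IndexError at rows[0], and a board with a row shorter than the first is not a
-- nonogram board (there A raises IndexError, or returns only when an earlier mismatch
-- happens to break each scan first).
def Pre_get_intersection_row (rows : List (List Int)) : Prop :=
  rows ≠ [] ∧ ∀ r ∈ rows, (rows.headD []).length ≤ r.length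
instance (rows : List (List Int)) : Decidable (Pre_get_intersection_row rows) := by
  unfold Pre_get_intersection_row; infer_instance

def pvWitness_get_intersection_row : List (List Int) := [[1, 2], [1, 3]]

def Spec_get_intersection_row (rows : List (List Int)) (out : List Int) : Prop := out = get_intersection_row_alt rows
instance (rows : List (List Int)) (out : List Int) : Decidable (Spec_get_intersection_row rows out) := by unfold Spec_get_intersection_row; infer_instance

-- ===== CLAIM (what is proved, stated in full; the proofs are below) =====
def Claim_equal_get_intersection_row : Prop := ∀ (rows : List (List Int)), Dom_get_intersection_row rows → Pre_get_intersection_row rows → Spec_get_intersection_row rows (get_intersection_row rows)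

-- ===== LEMMAS AND PROOFS =====

-- A's inner loop succeeds iff every row agrees with the first row at column i
theorem pvAllEq_iff (i : Int) (r0 : List Int) (rs : List (List Int)) :
    pvAllEq i (r0 :: rs) = true ↔
      ∀ r ∈ rs, PySem.List.pyGetD r i 0 = PySem.List.pyGetD r0 i 0 := by
  induction rs generalizing r0 with
  | nil => simp [pvAllEq]
  | cons r1 rs ih =>
    rw [pvAllEq]
    by_cases h : PySem.List.pyGetD r0 i 0 = PySem.List.pyGetD r1 i 0
    · rw [if_pos h, ih]
      constructor
      · intro hall r hr
        rcases List.mem_cons.1 hr with rfl | hr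
        · exact h.symm
        · exact (hall r hr).trans h.symm
      · intro hall r hr
        exact (hall r (List.mem_cons_of_mem _ hr)).trans h
    · rw [if_neg h]
      constructor
      · intro hf; exact absurd hf (by simp)
      · intro hall
        exact absurd (hall r1 List.mem_cons_self).symm h

theorem pvMerge_length (a r : List Int) : (pvMerge a r).length = min a.length r.length := by
  simp [pvMerge]

-- B's fold keeps the accumulator's length when every remaining row is at least as long
theorem pvFold_length (rs : List (List Int)) (acc : List Int)
    (h : ∀ r ∈ rs, acc.length ≤ r.length) :
    (rs.foldl pvMerge acc).length = acc.length := by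
  induction rs generalizing acc with
  | nil => rfl
  | cons r1 rs ih =>
    have h1 := h r1 List.mem_cons_self
    have hlen : (pvMerge acc r1).length = acc.length := by
      rw [pvMerge_length]; omega
    rw [List.foldl_cons, ih (pvMerge acc r1)
      (fun r hr => hlen ▸ h r (List.mem_cons_of_mem _ hr)), hlen]

-- pointwise characterisation of B's fold: a cell survives iff every row agrees with it
theorem pvFold_getD (rs : List (List Int)) (acc : List Int) (k : Nat)
    (h : ∀ r ∈ rs, acc.length ≤ r.length) (hk : k < acc.length) :
    (rs.foldl pvMerge acc).getD k 0 =
      if ∀ r ∈ rs, r.getD k 0 = acc.getD k 0 then acc.getD k 0 else -1 := by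
  induction rs generalizing acc with
  | nil => simp
  | cons r1 rs ih =>
    have h1 := h r1 List.mem_cons_self
    have hlen : (pvMerge acc r1).length = acc.length := by
      rw [pvMerge_length]; omega
    have hk1 : k < r1.length := by omega
    have hmk : (pvMerge acc r1).getD k 0 =
        if acc.getD k 0 = r1.getD k 0 then acc.getD k 0 else -1 := by
      rw [List.getD_eq_getElem _ _ (by omega : k < (pvMerge acc r1).length),
        List.getD_eq_getElem _ _ hk, List.getD_eq_getElem _ _ hk1]
      simp [pvMerge]
    rw [List.foldl_cons, ih (pvMerge acc r1)
      (fun r hr => hlen ▸ h r (List.mem_cons_of_mem _ hr)) (by omega)]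
    by_cases hc : acc.getD k 0 = r1.getD k 0
    · rw [hmk, if_pos hc]
      by_cases hall : ∀ r ∈ rs, r.getD k 0 = acc.getD k 0
      · rw [if_pos hall, if_pos]
        intro r hr
        rcases List.mem_cons.1 hr with rfl | hr
        · exact hc.symm
        · exact hall r hr
      · rw [if_neg hall, if_neg]
        intro hall'
        exact hall (fun r hr => hall' r (List.mem_cons_of_mem _ hr))
    · rw [hmk, if_neg hc]
      have hrhs : ¬ ∀ r ∈ r1 :: rs, r.getD k 0 = acc.getD k 0 :=
        fun hall' => hc (hall' r1 List.mem_cons_self).symm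
      rw [if_neg hrhs]
      split <;> rfl

-- ===== VERDICT (by name: the statement is the Claim_ definition above) =====
theorem get_intersection_row_spec : Claim_equal_get_intersection_row := by
  intro rows _ hpre
  obtain ⟨h1, h2⟩ := hpre
  unfold Spec_get_intersection_row get_intersection_row get_intersection_row_alt
  obtain ⟨r0, rs, rfl⟩ := List.exists_cons_of_ne_nil h1
  simp only [List.headD_cons, List.tail_cons] at h2 ⊢
  have h2' : ∀ r ∈ rs, r0.length ≤ r.length :=
    fun r hr => h2 r (List.mem_cons_of_mem _ hr)
  rw [PySem.List.pyRange_one]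
  have hb : (fun (acc : List Int) (i : Int) =>
      if pvAllEq i (r0 :: rs) = true then acc ++ [PySem.List.pyGetD r0 i (-1)] else acc ++ [-1])
      = fun acc i => acc ++ [if pvAllEq i (r0 :: rs) = true then PySem.List.pyGetD r0 i (-1) else -1] := by
    funext acc i; split <;> rfl
  rw [hb, PySem.List.foldl_append_singleton_eq_map, List.map_map]
  simp only [sub_zero, Int.toNat_natCast]
  apply List.ext_getElem
  · rw [pvFold_length rs r0 h2']; simp
  intro k hkl hkr
  have hk : k < r0.length := pvFold_length rs r0 h2' ▸ hkr
  simp only [List.nil_append] at hkl ⊢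
  rw [List.getElem_map, ← List.getD_eq_getElem _ 0 hkr, pvFold_getD rs r0 k h2' hk]
  simp only [Function.comp_apply, List.getElem_range, zero_add]
  have hiff : pvAllEq (k : Int) (r0 :: rs) = true ↔ ∀ r ∈ rs, r.getD k 0 = r0.getD k 0 := by
    rw [pvAllEq_iff]
    simp only [PySem.List.pyGetD_natCast]
  by_cases hc : pvAllEq (k : Int) (r0 :: rs) = true
  · rw [if_pos hc, if_pos (hiff.1 hc), PySem.List.pyGetD_natCast,
      List.getD_eq_getElem _ _ hk, List.getD_eq_getElem _ _ hk]
  · rw [if_neg hc, if_neg (fun h => hc (hiff.2 h))]
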